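-- pv_equiv track=rewrite | github.com/Ilya758/leetcode-sltns | prefixSum/medium/fixedRatio.py | fixedRatio
-- ===== SOURCE A (Python) =====
-- from typing import Counter
--
-- def fixedRatio(s: str, num1: int, num2: int) -> int:
--     ans = prefix = 0
--     freq = Counter({0 : 1})
--
--     for c in s:
--         prefix += num2 if c == '0' else -num1
--         ans += freq[prefix]
--         freq[prefix] += 1
--
--     return ans
-- ===== SOURCE B (Python) =====
-- def fixedRatio(s: str, num1: int, num2: int) -> int:
--     prefixes = [0]
--     p = 0
--     for c in s:
--         p += num2 if c == '0' else -num1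
--         prefixes.append(p)
--     prefixes.sort()
--     ans = 0
--     run = 0
--     for prev, cur in zip(prefixes, prefixes[1:]):
--         if cur == prev:
--             run += 1
--             ans += run
--         else:
--             run = 0
--     return ans
-- ===== Notes on version B (the rewrite author's own statement) =====
-- stated objective: faster
-- what changed: Replaces A's hash-map (Counter) of prefix frequencies updated on the fly with sort-based grouping: build the prefix list (seed 0 included), sort it, then count equal pairs in one adjacent-run scan over the sorted list with no dictionary at all.
import Mathlib
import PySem

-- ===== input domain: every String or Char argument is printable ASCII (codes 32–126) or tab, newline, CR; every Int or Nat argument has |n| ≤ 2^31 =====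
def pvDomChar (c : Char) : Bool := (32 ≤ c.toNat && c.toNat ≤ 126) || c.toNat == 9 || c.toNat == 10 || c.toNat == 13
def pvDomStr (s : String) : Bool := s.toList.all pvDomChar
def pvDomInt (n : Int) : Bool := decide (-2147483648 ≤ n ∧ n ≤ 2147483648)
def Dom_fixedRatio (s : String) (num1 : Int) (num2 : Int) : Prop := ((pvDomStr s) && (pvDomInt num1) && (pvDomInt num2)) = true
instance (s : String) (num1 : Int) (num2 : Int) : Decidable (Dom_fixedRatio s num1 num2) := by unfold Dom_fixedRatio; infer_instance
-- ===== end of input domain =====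

-- B replaces A's on-the-fly Counter of prefix frequencies by sort-based grouping: collect the
-- prefix values (seed 0 included), sort them, and count equal pairs in one adjacent-run scan,
-- using no dictionary (objective: measurably faster in CPython, where list.sort beats per-char Counter updates).

-- ===== PORT A =====
def fixedRatio (s : String) (num1 : Int) (num2 : Int) : Int :=
  (s.toList.foldl
    (fun (st : Int × Int × PySem.Dict Int Int) c =>
      let pfx := st.2.1 + (if c = '0' then num2 else -num1)
      (st.1 + st.2.2.getD pfx 0, pfx, st.2.2.modify pfx 0 (· + 1)))
    (0, 0, PySem.Dict.ofList [((0 : Int), (1 : Int))])).1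

-- ===== PORT B =====
def fixedRatio_alt (s : String) (num1 : Int) (num2 : Int) : Int :=
  let st := s.toList.foldl
    (fun (st : List Int × Int) c =>
      let p := st.2 + (if c = '0' then num2 else -num1)
      (st.1 ++ [p], p))
    ([0], 0)
  let prefixes := PySem.List.sorted st.1 (fun x => x) false
  ((prefixes.zip (PySem.List.slice prefixes (some 1) none)).foldl
    (fun (ar : Int × Int) pc =>
      if pc.2 = pc.1 then (ar.1 + (ar.2 + 1), ar.2 + 1) else (ar.1, 0))
    (0, 0)).1

-- ===== PRECONDITION & SPEC =====
def Spec_fixedRatio (s : String) (num1 : Int) (num2 : Int) (out : Int) : Prop := out = fixedRatio_alt s num1 num2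
instance (s : String) (num1 : Int) (num2 : Int) (out : Int) : Decidable (Spec_fixedRatio s num1 num2 out) := by unfold Spec_fixedRatio; infer_instance

-- ===== CLAIM (what is proved, stated in full; the proofs are below) =====
def Claim_equal_fixedRatio : Prop := ∀ (s : String) (num1 : Int) (num2 : Int), Dom_fixedRatio s num1 num2 → Spec_fixedRatio s num1 num2 (fixedRatio s num1 num2)

-- ===== LEMMAS AND PROOFS =====

/-- The per-character prefix delta. -/
def pvDelta (num1 num2 : Int) (c : Char) : Int := if c = '0' then num2 else -num1

/-- The list of prefix values produced while scanning `l` from prefix `p`. -/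
def pvPrefs (num1 num2 : Int) (p : Int) : List Char → List Int
  | [] => []
  | c :: t => (p + pvDelta num1 num2 c) :: pvPrefs num1 num2 (p + pvDelta num1 num2 c) t

/-- A's incremental pair count over the prefix stream `L`, having already seen `seen`. -/
def pvPairs (seen : List Int) : List Int → Int
  | [] => 0
  | x :: t => (seen.count x : Int) + pvPairs (seen ++ [x]) t

def pvC2 (c : Int) : Int := PySem.Int.floordiv (c * (c - 1)) 2

/-- The grouped pair count of a list: Σ over distinct k of C(count k, 2). -/
def pvSum (M : List Int) : Int := ((PySem.Set.ofList M).map (fun k => pvC2 ((M.count k : Nat) : Int))).sum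

/-- B's run scan over the tail of the sorted list, carrying the previous element. -/
def pvScan (prev ans run : Int) : List Int → Int
  | [] => ans
  | x :: t => if x = prev then pvScan x (ans + (run + 1)) (run + 1) t else pvScan x ans 0 t

theorem pvC2_succ (c : Int) : pvC2 (c + 1) = pvC2 c + c := by
  unfold pvC2
  rw [PySem.Int.floordiv_eq_ediv_of_pos (by norm_num), PySem.Int.floordiv_eq_ediv_of_pos (by norm_num)]
  have h : (c + 1) * (c + 1 - 1) = c * (c - 1) + c * 2 := by ring
  rw [h, Int.add_mul_ediv_right _ _ (by norm_num)]

theorem pv_sum_map_add (l : List Int) (f g : Int → Int) :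
    (l.map (fun k => f k + g k)).sum = (l.map f).sum + (l.map g).sum := by
  induction l with
  | nil => simp
  | cons h t ih => simp [ih]; ring

theorem pv_sum_ite (l : List Int) (x c : Int) (hx : x ∈ l) (hn : l.Nodup) :
    (l.map (fun k => if k = x then c else 0)).sum = c := by
  induction l with
  | nil => cases hx
  | cons a t ih =>
    by_cases hax : a = x
    · subst hax
      have hzero : ∀ k ∈ t, (if k = a then c else 0) = 0 := by
        intro k hk
        have : k ≠ a := fun e => (List.nodup_cons.mp hn).1 (e ▸ hk)
        simp [this]
      simp [List.map_congr_left hzero]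
    · have hxt : x ∈ t := by
        rcases List.mem_cons.mp hx with h | h
        · exact absurd h.symm hax
        · exact h
      simp [hax, ih hxt (List.nodup_cons.mp hn).2]

theorem pvSum_append_singleton (seen : List Int) (x : Int) :
    pvSum (seen ++ [x]) = pvSum seen + (seen.count x : Int) := by
  by_cases hx : x ∈ seen
  · have hset : PySem.Set.ofList (seen ++ [x]) = PySem.Set.ofList seen := by
      rw [PySem.Set.ofList_append_singleton]
      simp [PySem.Set.add, PySem.Set.contains, PySem.Set.mem_ofList, hx]
    have hcong : ∀ k ∈ PySem.Set.ofList seen,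
        pvC2 (((seen ++ [x]).count k : Nat) : Int)
          = pvC2 ((seen.count k : Nat) : Int) + (if k = x then (seen.count x : Int) else 0) := by
      intro k hk
      by_cases hkx : k = x
      · subst hkx
        have : (seen ++ [k]).count k = seen.count k + 1 := by simp [List.count_append]
        rw [this]
        push_cast
        rw [pvC2_succ]
        simp
      · have : (seen ++ [x]).count k = seen.count k := by
          simp [List.count_append, List.count_singleton]
          omega
        simp [this, hkx]
    unfold pvSum
    rw [hset, List.map_congr_left hcong, pv_sum_map_add,
        pv_sum_ite _ x _ ((PySem.Set.mem_ofList _ _).mpr hx) (PySem.Set.nodup_ofList _)]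
  · have hset : PySem.Set.ofList (seen ++ [x]) = PySem.Set.ofList seen ++ [x] := by
      rw [PySem.Set.ofList_append_singleton]
      simp [PySem.Set.add, PySem.Set.contains, PySem.Set.mem_ofList, hx]
    have hcong : ∀ k ∈ PySem.Set.ofList seen,
        pvC2 (((seen ++ [x]).count k : Nat) : Int) = pvC2 ((seen.count k : Nat) : Int) := by
      intro k hk
      have hkx : k ≠ x := fun e => hx (e ▸ (PySem.Set.mem_ofList _ _).mp hk)
      have : (seen ++ [x]).count k = seen.count k := by
        simp [List.count_append, List.count_singleton]
        omega
      rw [this]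
    have hcx : seen.count x = 0 := List.count_eq_zero_of_not_mem hx
    unfold pvSum
    rw [hset]
    rw [List.map_append, List.sum_append, List.map_congr_left hcong]
    simp [hcx]
    decide

theorem pvSum_append (L seen : List Int) : pvSum (seen ++ L) = pvSum seen + pvPairs seen L := by
  induction L generalizing seen with
  | nil => simp [pvPairs]
  | cons x t ih =>
    have : seen ++ x :: t = (seen ++ [x]) ++ t := by simp
    rw [this, ih (seen ++ [x]), pvSum_append_singleton, pvPairs]
    ring

/-- `pvSum` only depends on the multiset of elements. -/
theorem pvSum_perm (M N : List Int) (h : M.Perm N) : pvSum M = pvSum N := by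
  unfold pvSum
  have hcnt : ∀ k, (M.count k : Nat) = N.count k := fun k => h.count_eq k
  have hperm : (PySem.Set.ofList M).Perm (PySem.Set.ofList N) := by
    rw [List.perm_ext_iff_of_nodup (PySem.Set.nodup_ofList _) (PySem.Set.nodup_ofList _)]
    intro a
    rw [PySem.Set.mem_ofList, PySem.Set.mem_ofList]
    exact h.mem_iff
  have hfun : ∀ k ∈ PySem.Set.ofList M,
      pvC2 ((M.count k : Nat) : Int) = pvC2 ((N.count k : Nat) : Int) := by
    intro k _; rw [hcnt]
  rw [List.map_congr_left hfun]
  exact (hperm.map _).sum_eq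

/-- A's loop invariant: the dict holds the multiplicities of `seen`. -/
theorem pvA_fold (num1 num2 : Int) (l : List Char) :
    ∀ (ans p : Int) (d : PySem.Dict Int Int) (seen : List Int),
      (∀ v, d.getD v 0 = (seen.count v : Int)) →
      (l.foldl
        (fun (st : Int × Int × PySem.Dict Int Int) c =>
          let pfx := st.2.1 + (if c = '0' then num2 else -num1)
          (st.1 + st.2.2.getD pfx 0, pfx, st.2.2.modify pfx 0 (· + 1)))
        (ans, p, d)).1 = ans + pvPairs seen (pvPrefs num1 num2 p l) := by
  induction l with
  | nil => intro ans p d seen _; simp [pvPrefs, pvPairs]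
  | cons c t ih =>
    intro ans p d seen hinv
    simp only [List.foldl_cons]
    have hstep : ∀ v, (d.modify (p + (if c = '0' then num2 else -num1)) 0 (· + 1)).getD v 0
        = ((seen ++ [p + (if c = '0' then num2 else -num1)]).count v : Int) := by
      intro v
      rw [PySem.Dict.getD_modify]
      by_cases hv : v = p + (if c = '0' then num2 else -num1)
      · simp [hv, hinv, List.count_append]
      · simp [hv, hinv, List.count_append, List.count_singleton]
        omega
    rw [ih _ _ _ _ hstep]
    rw [hinv]
    show ans + _ + _ = ans + pvPairs seen ((p + pvDelta num1 num2 c) :: pvPrefs num1 num2 (p + pvDelta num1 num2 c) t)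
    rw [pvPairs]
    unfold pvDelta
    ring

/-- B's list-building loop collects the prefix values. -/
theorem pvB_fold (num1 num2 : Int) (l : List Char) :
    ∀ (acc : List Int) (p : Int),
      (l.foldl
        (fun (st : List Int × Int) c =>
          let q := st.2 + (if c = '0' then num2 else -num1)
          (st.1 ++ [q], q))
        (acc, p)).1 = acc ++ pvPrefs num1 num2 p l := by
  induction l with
  | nil => intro acc p; simp [pvPrefs]
  | cons c t ih =>
    intro acc p
    simp only [List.foldl_cons]
    rw [ih]
    simp [pvPrefs, pvDelta]

theorem pv_init_dict (v : Int) :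
    (PySem.Dict.ofList [((0 : Int), (1 : Int))]).getD v 0 = (([(0 : Int)].count v : Nat) : Int) := by
  by_cases hv : v = 0
  · subst hv; decide
  · have h1 : [(0 : Int)].count v = 0 := by
      simp [List.count_singleton]
      omega
    have h2 : (PySem.Dict.ofList [((0 : Int), (1 : Int))]).getD v 0 = 0 := by
      have : (PySem.Dict.ofList [((0 : Int), (1 : Int))]) = (PySem.Dict.empty).insert 0 1 := rfl
      rw [this, PySem.Dict.getD_insert]
      simp [hv, PySem.Dict.getD_empty]
    rw [h1, h2]; rfl

/-- B's zip fold is the structural scan `pvScan`. -/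
theorem pv_zip_fold (l : List Int) :
    ∀ (prev ans run : Int),
      (((prev :: l).zip l).foldl
        (fun (ar : Int × Int) pc =>
          if pc.2 = pc.1 then (ar.1 + (ar.2 + 1), ar.2 + 1) else (ar.1, 0))
        (ans, run)).1 = pvScan prev ans run l := by
  induction l with
  | nil => intro prev ans run; simp [pvScan]
  | cons x t ih =>
    intro prev ans run
    simp only [List.zip_cons_cons, List.foldl_cons, pvScan]
    by_cases hx : x = prev
    · simp [hx, ih]
    · simp [hx, ih]

/-- On a sorted tail, the run counter equals the multiplicity of `prev` among the
    already-seen elements, and the scan computes A-style incremental pairs. -/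
theorem pv_scan_spec (l : List Int) :
    ∀ (prev ans : Int) (seen : List Int),
      (prev :: l).Pairwise (· ≤ ·) →
      (∀ y ∈ seen, y ≤ prev) →
      pvScan prev ans (seen.count prev : Nat) l = ans + pvPairs (seen ++ [prev]) l := by
  induction l with
  | nil => intro prev ans seen _ _; simp [pvScan, pvPairs]
  | cons x t ih =>
    intro prev ans seen hsort hseen
    have hple : prev ≤ x := (List.pairwise_cons.mp hsort).1 x (List.mem_cons_self)
    have hsort' : (x :: t).Pairwise (· ≤ ·) := (List.pairwise_cons.mp hsort).2
    simp only [pvScan, pvPairs]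
    by_cases hx : x = prev
    · subst hx
      have hc : ((seen ++ [x]).count x : Nat) = seen.count x + 1 := by
        simp [List.count_append]
      have hseen' : ∀ y ∈ seen ++ [x], y ≤ x := by
        intro y hy
        rcases List.mem_append.mp hy with h | h
        · exact hseen y h
        · simp at h; omega
      have := ih x (ans + ((seen.count x : Nat) + 1)) (seen ++ [x]) hsort' hseen'
      rw [hc] at this
      rw [if_pos rfl]
      push_cast at this ⊢
      rw [this, hc]
      push_cast
      ring
    · have hlt : prev < x := lt_of_le_of_ne hple (fun e => hx e.symm)
      have hc0 : (seen ++ [prev]).count x = 0 := by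
        apply List.count_eq_zero_of_not_mem
        intro hmem
        rcases List.mem_append.mp hmem with h | h
        · exact absurd (hseen x h) (not_le.mpr hlt)
        · simp at h; omega
      have hseen' : ∀ y ∈ seen ++ [prev], y ≤ x := by
        intro y hy
        rcases List.mem_append.mp hy with h | h
        · exact le_of_lt (lt_of_le_of_lt (hseen y h) hlt)
        · simp at h; omega
      have := ih x ans (seen ++ [prev]) hsort' hseen'
      rw [hc0] at this
      push_cast at this
      simp only [if_neg hx]
      rw [this, hc0]
      push_cast
      ring

/-- The run scan over the sorted list counts all equal pairs. -/
theorem pv_scan_sorted (M : List Int) :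
    (((PySem.List.sorted M (fun x => x) false).zip
        (PySem.List.slice (PySem.List.sorted M (fun x => x) false) (some 1) none)).foldl
      (fun (ar : Int × Int) pc =>
        if pc.2 = pc.1 then (ar.1 + (ar.2 + 1), ar.2 + 1) else (ar.1, 0))
      (0, 0)).1 = pvSum M := by
  rw [PySem.List.slice_from_one]
  have hperm : (PySem.List.sorted M (fun x => x) false).Perm M :=
    PySem.List.sorted_perm M (fun x => x) false
  have hsorted : (PySem.List.sorted M (fun x => x) false).Pairwise (· ≤ ·) :=
    PySem.List.sorted_pairwise M (fun x => x)
  rcases hSc : PySem.List.sorted M (fun x => x) false with _ | ⟨a, rest⟩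
  · have hM : M = [] := by
      rw [hSc] at hperm
      exact hperm.symm.eq_nil
    subst hM
    decide
  · rw [hSc] at hperm hsorted
    have htail : (a :: rest).tail = rest := rfl
    rw [htail, pv_zip_fold]
    have h0 : (([] : List Int).count a : Nat) = 0 := rfl
    have hspec := pv_scan_spec rest a 0 [] hsorted (by intro y hy; cases hy)
    rw [h0] at hspec
    push_cast at hspec
    rw [hspec]
    have hsum : pvSum M = pvSum (a :: rest) := pvSum_perm M (a :: rest) hperm.symm
    rw [hsum]
    have hsp : (a :: rest) = [a] ++ rest := rfl
    rw [hsp, pvSum_append]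
    have ha : pvSum [a] = 0 := by
      unfold pvSum pvC2
      simp [PySem.Set.ofList, PySem.Set.add, PySem.Set.contains]
    rw [ha]
    simp

theorem pv_main (s : String) (num1 num2 : Int) : fixedRatio s num1 num2 = fixedRatio_alt s num1 num2 := by
  unfold fixedRatio fixedRatio_alt
  rw [pvA_fold num1 num2 s.toList 0 0 _ [0] pv_init_dict]
  have hB := pvB_fold num1 num2 s.toList [0] 0
  simp only [hB]
  rw [pv_scan_sorted ([0] ++ pvPrefs num1 num2 0 s.toList)]
  rw [pvSum_append]
  have h0 : pvSum [0] = 0 := by decide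
  rw [h0]

-- ===== VERDICT (by name: the statement is the Claim_ definition above) =====
theorem fixedRatio_spec : Claim_equal_fixedRatio := by
  intro s num1 num2 _
  unfold Spec_fixedRatio
  exact pv_main s num1 num2
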